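-- pv_equiv track=rewrite | github.com/jiyongYoon/Baekjoon_Practice | 프로그래머스/unrated/181893. 배열 조각하기/배열 조각하기.py | solution
-- ===== SOURCE A (Python) =====
-- def solution(arr, query):
--     idx = 0
--     for i in query:
--         if idx % 2 == 0:
--             del arr[i + 1:]
--         else:
--             del arr[:i]
--         idx += 1
--
--     return arr
-- ===== SOURCE B (Python) =====
-- def solution(arr, query):
--     # Keep window bounds [lo, hi) into the
--     # original array; a single slice at the end. (A mutates arr in place;
--     # B does not — the equivalence is about the return value.)
--     lo, hi = 0, len(arr)
--     for k, i in enumerate(query):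
--         n = hi - lo
--         if k % 2 == 0:
--             j = i + 1
--             hi = lo + (max(0, n + j) if j < 0 else min(j, n))
--         else:
--             lo = lo + (max(0, n + i) if i < 0 else min(i, n))
--     return arr[lo:hi]
-- ===== Notes on version B (the rewrite author's own statement) =====
-- stated objective: alternative
-- what changed: Instead of physically deleting a slice of the list on every query, B keeps a window [lo, hi) of indices into the untouched array, updates one bound per query with clamped Python-slice arithmetic, and slices once at the end (A mutates arr in place; the equivalence is about the return value).
import Mathlib
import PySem

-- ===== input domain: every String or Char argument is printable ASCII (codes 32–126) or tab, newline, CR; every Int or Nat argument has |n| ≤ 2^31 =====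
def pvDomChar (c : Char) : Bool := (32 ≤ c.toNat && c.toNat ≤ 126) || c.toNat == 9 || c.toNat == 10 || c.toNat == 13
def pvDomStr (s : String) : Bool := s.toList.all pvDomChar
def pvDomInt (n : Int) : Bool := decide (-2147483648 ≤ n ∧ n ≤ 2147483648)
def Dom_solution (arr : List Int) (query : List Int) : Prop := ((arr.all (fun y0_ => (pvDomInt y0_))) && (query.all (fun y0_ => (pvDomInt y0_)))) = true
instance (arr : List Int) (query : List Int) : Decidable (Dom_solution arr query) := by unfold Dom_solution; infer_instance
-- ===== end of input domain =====

-- B replaces A's per-query in-place slice deletion by window-bound bookkeeping with one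
-- final slice; A mutates arr in place, so the equivalence is about the RETURN value only.

-- ===== PORT A =====
-- the for-loop over query with the mutable (arr, idx) state
def goA : List Int → Int → List Int → List Int
  | l, _, [] => l
  | l, idx, i :: qs =>
    if idx % 2 == 0 then
      -- del arr[i+1:]  keeps arr[:i+1]
      goA (PySem.List.slice l none (some (i + 1))) (idx + 1) qs
    else
      -- del arr[:i]  keeps arr[i:]
      goA (PySem.List.slice l (some i) none) (idx + 1) qs

def solution (arr : List Int) (query : List Int) : List Int := goA arr 0 query

-- ===== PORT B =====
-- the for-loop over enumerate(query) updating the bounds (lo, hi)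
def goB : Int → Int → Int → List Int → Int × Int
  | _, lo, hi, [] => (lo, hi)
  | k, lo, hi, i :: qs =>
    let n := hi - lo
    if k % 2 == 0 then
      let j := i + 1
      goB (k + 1) lo (lo + (if j < 0 then max 0 (n + j) else min j n)) qs
    else
      goB (k + 1) (lo + (if i < 0 then max 0 (n + i) else min i n)) hi qs

def solution_alt (arr : List Int) (query : List Int) : List Int :=
  let p := goB 0 0 (arr.length : Int) query
  PySem.List.slice arr (some p.1) (some p.2)

-- ===== PRECONDITION & SPEC =====
def Spec_solution (arr : List Int) (query : List Int) (out : List Int) : Prop := out = solution_alt arr query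
instance (arr : List Int) (query : List Int) (out : List Int) : Decidable (Spec_solution arr query out) := by unfold Spec_solution; infer_instance

-- ===== CLAIM (what is proved, stated in full; the proofs are below) =====
def Claim_equal_solution : Prop := ∀ (arr : List Int) (query : List Int), Dom_solution arr query → Spec_solution arr query (solution arr query)

-- ===== LEMMAS AND PROOFS =====

theorem slice_none_some (xs : List Int) (b : Int) :
    PySem.List.slice xs none (some b) = xs.take (PySem.List.clampIdx xs.length b) := by
  unfold PySem.List.slice
  simp

theorem goA_eq_goB : ∀ (qs : List Int) (k : Int) (arr : List Int) (lo hi : Nat),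
    lo ≤ hi → hi ≤ arr.length →
    goA (PySem.List.slice arr (some (lo : Int)) (some (hi : Int))) k qs =
      PySem.List.slice arr (some (goB k lo hi qs).1) (some (goB k lo hi qs).2) := by
  intro qs
  induction qs with
  | nil => intro k arr lo hi _ _; rfl
  | cons i qs ih =>
    intro k arr lo hi h1 h2
    have hlen : (PySem.List.slice arr (some (lo : Int)) (some (hi : Int))).length = hi - lo := by
      rw [PySem.List.slice_natCast]
      simp [List.length_take, List.length_drop]
      omega
    by_cases hk : k % 2 == 0
    · -- even step: del l[i+1:]
      set j : Int := i + 1 with hj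
      set c : Nat := PySem.List.clampIdx (hi - lo) j with hc
      have hcle : c ≤ hi - lo := by
        rw [hc]; unfold PySem.List.clampIdx; split_ifs <;> omega
      have hcut : (lo : Int) + (if j < 0 then max 0 (((hi : Int) - lo) + j) else min j ((hi : Int) - lo))
          = ((lo + c : Nat) : Int) := by
        rw [hc]; unfold PySem.List.clampIdx; split_ifs <;> push_cast <;> omega
      have hstep : PySem.List.slice (PySem.List.slice arr (some (lo : Int)) (some (hi : Int))) none (some j)
          = PySem.List.slice arr (some ((lo : Int))) (some ((lo + c : Nat) : Int)) := by
        rw [slice_none_some, hlen, ← hc, PySem.List.slice_natCast, PySem.List.slice_natCast,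
          List.take_take]
        congr 1
        omega
      simp only [goA, goB, hk, if_true]
      rw [hstep, hcut]
      exact ih (k + 1) arr lo (lo + c) (by omega) (by omega)
    · -- odd step: del l[:i]
      set c : Nat := PySem.List.clampIdx (hi - lo) i with hc
      have hcle : c ≤ hi - lo := by
        rw [hc]; unfold PySem.List.clampIdx; split_ifs <;> omega
      have hcut : (lo : Int) + (if i < 0 then max 0 (((hi : Int) - lo) + i) else min i ((hi : Int) - lo))
          = ((lo + c : Nat) : Int) := by
        rw [hc]; unfold PySem.List.clampIdx; split_ifs <;> push_cast <;> omega
      have hstep : PySem.List.slice (PySem.List.slice arr (some (lo : Int)) (some (hi : Int))) (some i) none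
          = PySem.List.slice arr (some ((lo + c : Nat) : Int)) (some ((hi : Nat) : Int)) := by
        rw [PySem.List.slice_some_none, hlen, ← hc]
        rw [PySem.List.slice_natCast, PySem.List.slice_natCast]
        rw [List.drop_take, List.drop_drop]
        congr 1; omega
      simp only [goA, goB, hk]
      rw [hstep, hcut]
      exact ih (k + 1) arr (lo + c) hi (by omega) (by omega)

-- ===== VERDICT (by name: the statement is the Claim_ definition above) =====
theorem solution_spec : Claim_equal_solution := by
  intro arr query _
  unfold Spec_solution solution solution_alt
  have h0 : arr = PySem.List.slice arr (some ((0 : Nat) : Int)) (some ((arr.length : Nat) : Int)) := by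
    rw [PySem.List.slice_natCast]; simp
  conv_lhs => rw [h0]
  exact goA_eq_goB query 0 arr 0 arr.length (by omega) (by omega)
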